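-- pv_equiv track=rewrite | github.com/maxidragon/AdventOfCode | 2023/day1/part2/day1.py | last_word_fun
-- ===== SOURCE A (Python) =====
-- numbers_str_to_iterate = ["one", "two", "three", "four", "five", "six", "seven", "eight", "nine"]
--
-- def last_word_fun(line):
--     return_element = None
--     last_element = None
--     for element in numbers_str_to_iterate:
--         str_element = str(element)
--         if str_element in line:
--             if last_element is None or line.index(str_element) > line.index(str(last_element)):
--                 last_element = str_element
--         if last_element:
--             return_element = last_element
--     return return_element
-- ===== SOURCE B (Python) =====
-- numbers_str_to_iterate = ["one", "two", "three", "four", "five", "six", "seven", "eight", "nine"]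
--
-- def last_word_fun(line):
--     # Single left-to-right scan over positions: first occurrences are discovered
--     # in increasing position order, so the last newly-seen word is the answer.
--     seen = set()
--     result = None
--     for i in range(len(line)):
--         for word in numbers_str_to_iterate:
--             if word not in seen and line.startswith(word, i):
--                 seen.add(word)
--                 result = word
--     return result
-- ===== Notes on version B (the rewrite author's own statement) =====
-- stated objective: alternative
-- what changed: Replaces A's per-word `in`/`.index` substring scans with a single left-to-right scan over string positions that records each word at its first occurrence; since first occurrences are discovered in increasing position order, the last newly recorded word is the answer, so no index comparisons or repeated scans are needed.
import Mathlib
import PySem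

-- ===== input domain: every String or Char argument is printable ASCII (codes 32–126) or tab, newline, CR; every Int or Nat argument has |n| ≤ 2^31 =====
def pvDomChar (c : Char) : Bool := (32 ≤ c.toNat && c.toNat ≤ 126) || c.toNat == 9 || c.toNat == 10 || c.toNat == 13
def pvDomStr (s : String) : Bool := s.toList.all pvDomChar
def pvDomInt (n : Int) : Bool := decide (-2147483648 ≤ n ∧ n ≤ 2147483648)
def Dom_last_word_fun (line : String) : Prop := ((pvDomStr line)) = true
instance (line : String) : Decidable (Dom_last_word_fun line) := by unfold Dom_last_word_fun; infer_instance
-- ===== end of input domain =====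

-- B replaces A's per-word `in`/`.index` scans by one left-to-right scan over string positions
-- recording newly seen words (alternative algorithm, no speed claim); equal return value proved.

-- ===== PORT A =====
def pvWords : List String := ["one", "two", "three", "four", "five", "six", "seven", "eight", "nine"]

-- loop body of A; `line.index` is guarded by `in line`, where it equals Str.find;
-- `if last_element:` is Python truthiness of Optional[str] (is not None and non-empty)
def pvStepA (line : String) (st : Option String × Option String) (element : String) :
    Option String × Option String :=
  let str_element := element  -- str(element) on a str is the identity
  let last :=
    if PySem.Str.isIn str_element line = true then
      (if st.2 = none ∨ PySem.Str.find line str_element > PySem.Str.find line (st.2.getD "")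
       then some str_element else st.2)
    else st.2
  let ret := if last ≠ none ∧ last.getD "" ≠ "" then last else st.1
  (ret, last)

def last_word_fun (line : String) : Option String :=
  (pvWords.foldl (pvStepA line) (none, none)).1

-- ===== PORT B =====
-- inner loop body of B; line.startswith(word, i) with 0 ≤ i < len(line) is ported as a
-- prefix test on line.toList.drop i.toNat (exact there)
def pvStepBInner (line : String) (i : Int) (st : PySem.Set String × Option String)
    (word : String) : PySem.Set String × Option String :=
  if PySem.Set.contains st.1 word = false ∧
     PySem.Chars.startswith (line.toList.drop i.toNat) word.toList = true
  then (PySem.Set.add st.1 word, some word)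
  else st

def pvStepBOuter (line : String) (st : PySem.Set String × Option String) (i : Int) :
    PySem.Set String × Option String :=
  pvWords.foldl (pvStepBInner line i) st

def last_word_fun_alt (line : String) : Option String :=
  ((PySem.List.pyRange 0 (PySem.Str.len line) 1).foldl (pvStepBOuter line)
    (PySem.Set.empty, none)).2

-- ===== PRECONDITION & SPEC =====
def Spec_last_word_fun (line : String) (out : Option String) : Prop := out = last_word_fun_alt line
instance (line : String) (out : Option String) : Decidable (Spec_last_word_fun line out) := by unfold Spec_last_word_fun; infer_instance

-- ===== CLAIM (what is proved, stated in full; the proofs are below) =====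
def Claim_equal_last_word_fun : Prop := ∀ (line : String), Dom_last_word_fun line → Spec_last_word_fun line (last_word_fun line)

-- ===== LEMMAS AND PROOFS =====

-- first-occurrence index of w in line (Python line.find(w); -1 if absent)
def pvG (line w : String) : Int := PySem.Str.find line w

-- "o is the answer": none iff no word occurs, else a present word of maximal first index
def pvIsAns (line : String) (o : Option String) : Prop :=
  (o = none → ∀ w ∈ pvWords, pvG line w < 0) ∧
  (∀ m, o = some m → m ∈ pvWords ∧ 0 ≤ pvG line m ∧
    ∀ w ∈ pvWords, 0 ≤ pvG line w → pvG line w ≤ pvG line m)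

lemma pv_words_prefix : ∀ w1 ∈ pvWords, ∀ w2 ∈ pvWords, w1.toList <+: w2.toList → w1 = w2 := by
  decide

lemma pv_words_ne_nil : ∀ w ∈ pvWords, w.toList ≠ [] := by decide

lemma pvG_eq (line w : String) : pvG line w = PySem.Chars.find line.toList w.toList := by
  simp [pvG]

lemma pv_prefix_drop (line w : String) {j : Nat} (h : w.toList <+: line.toList.drop j) :
    0 ≤ pvG line w ∧ pvG line w ≤ (j : Int) := by
  rw [pvG_eq]
  have hinf : w.toList <:+: line.toList :=
    h.isInfix.trans (List.drop_suffix j line.toList).isInfix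
  have h0 : 0 ≤ PySem.Chars.find line.toList w.toList :=
    (PySem.Chars.find_nonneg_iff line.toList w.toList).2 hinf
  refine ⟨h0, ?_⟩
  by_contra hlt
  exact (PySem.Chars.find_spec h0).2 j (by omega) h

lemma pv_eq_prefix_drop (line w : String) {i : Int} (hi : 0 ≤ i) (h : pvG line w = i) :
    w.toList <+: line.toList.drop i.toNat := by
  rw [pvG_eq] at h
  have h0 : 0 ≤ PySem.Chars.find line.toList w.toList := by omega
  have := (PySem.Chars.find_spec h0).1
  rwa [h] at this

lemma pv_tie (line w1 w2 : String) (h1 : w1 ∈ pvWords) (h2 : w2 ∈ pvWords)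
    (hg : 0 ≤ pvG line w1) (he : pvG line w1 = pvG line w2) : w1 = w2 := by
  have p1 := pv_eq_prefix_drop line w1 hg (rfl : pvG line w1 = pvG line w1)
  have p2 := pv_eq_prefix_drop line w2 hg he.symm
  rcases List.prefix_or_prefix_of_prefix p1 p2 with h | h
  · exact pv_words_prefix w1 h1 w2 h2 h
  · exact (pv_words_prefix w2 h2 w1 h1 h).symm

lemma pv_unique (line : String) (o1 o2 : Option String)
    (h1 : pvIsAns line o1) (h2 : pvIsAns line o2) : o1 = o2 := by
  match o1, o2 with
  | none, none => rfl
  | none, some m =>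
    obtain ⟨hm, hg, _⟩ := h2.2 m rfl
    exact absurd hg (by have := h1.1 rfl m hm; omega)
  | some m, none =>
    obtain ⟨hm, hg, _⟩ := h1.2 m rfl
    exact absurd hg (by have := h2.1 rfl m hm; omega)
  | some m1, some m2 =>
    obtain ⟨hm1, hg1, hmax1⟩ := h1.2 m1 rfl
    obtain ⟨hm2, hg2, hmax2⟩ := h2.2 m2 rfl
    have he : pvG line m1 = pvG line m2 :=
      le_antisymm (hmax2 m1 hm1 hg1) (hmax1 m2 hm2 hg2)
    exact congrArg some (pv_tie line m1 m2 hm1 hm2 hg1 he)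

-- ---- A side ----

def pvInvA (line : String) (done : List String) (st : Option String × Option String) : Prop :=
  st.1 = st.2 ∧
  (st.2 = none → ∀ w ∈ done, pvG line w < 0) ∧
  (∀ m, st.2 = some m → m ∈ done ∧ 0 ≤ pvG line m ∧
    ∀ w ∈ done, 0 ≤ pvG line w → pvG line w ≤ pvG line m)

lemma pv_isIn_iff (line e : String) : PySem.Str.isIn e line = true ↔ 0 ≤ pvG line e := by
  rw [pvG_eq, PySem.Str.isIn_iff_infix, ← PySem.Chars.find_nonneg_iff]

lemma pvA_step (line : String) (done : List String) (st : Option String × Option String)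
    (e : String) (hne : e.toList ≠ []) (h : pvInvA line done st) :
    pvInvA line (done ++ [e]) (pvStepA line st e) := by
  obtain ⟨h12, hnone, hsome⟩ := h
  have hne' : e ≠ "" := fun hh => hne (by simp [hh])
  by_cases hin : PySem.Str.isIn e line = true
  · by_cases hcond : st.2 = none ∨ PySem.Str.find line e > PySem.Str.find line (st.2.getD "")
    · -- last becomes some e
      have hstep : pvStepA line st e = (some e, some e) := by
        simp only [pvStepA]
        rw [if_pos hin, if_pos hcond]
        simp [hne']
      rw [hstep]
      have hge : 0 ≤ pvG line e := (pv_isIn_iff line e).1 hin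
      refine ⟨rfl, by simp, ?_⟩
      intro m hm
      cases hm
      refine ⟨by simp, hge, ?_⟩
      intro w hw hgw
      rcases List.mem_append.1 hw with hw | hw
      · rcases hcond with hc | hc
        · exact absurd hgw (by have := hnone hc w hw; omega)
        · match hst : st.2 with
          | none => exact absurd hgw (by have := hnone hst w hw; omega)
          | some m' =>
            obtain ⟨_, _, hmax⟩ := hsome m' hst
            have h1 := hmax w hw hgw
            rw [hst] at hc
            simp only [Option.getD_some] at hc
            have : pvG line m' < pvG line e := by simpa [pvG] using hc
            omega
      · simp at hw; subst hw; exact le_refl _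
    · -- last stays st.2 = some m'
      rcases Option.ne_none_iff_exists'.1 (fun hh => hcond (Or.inl hh)) with ⟨m', hst⟩
      have hle : pvG line e ≤ pvG line m' := by
        have : ¬ PySem.Str.find line e > PySem.Str.find line (st.2.getD "") :=
          fun hh => hcond (Or.inr hh)
        rw [hst] at this
        simpa [pvG] using this
      have hstep : pvStepA line st e = (st.1, st.2) := by
        simp only [pvStepA]
        rw [if_pos hin, if_neg hcond, h12, hst]
        rw [ite_self]
      rw [hstep]
      refine ⟨h12, ?_, ?_⟩
      · intro hh; rw [hh] at hst; cases hst
      · intro m hm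
        obtain ⟨hmem, hgm, hmax⟩ := hsome m hm
        refine ⟨List.mem_append_left _ hmem, hgm, ?_⟩
        intro w hw hgw
        rcases List.mem_append.1 hw with hw | hw
        · exact hmax w hw hgw
        · simp at hw; subst hw
          rw [hst] at hm; cases hm
          exact hle
  · -- e not in line
    have hgneg : pvG line e < 0 := by
      have := (pv_isIn_iff line e).not.1 hin; omega
    have hstep : pvStepA line st e = (st.1, st.2) := by
      simp only [pvStepA]
      rw [if_neg hin, h12, ite_self]
    rw [hstep]
    refine ⟨h12, ?_, ?_⟩
    · intro hh w hw
      rcases List.mem_append.1 hw with hw | hw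
      · exact hnone hh w hw
      · simp at hw; subst hw; exact hgneg
    · intro m hm
      obtain ⟨hmem, hgm, hmax⟩ := hsome m hm
      refine ⟨List.mem_append_left _ hmem, hgm, ?_⟩
      intro w hw hgw
      rcases List.mem_append.1 hw with hw | hw
      · exact hmax w hw hgw
      · simp at hw; subst hw; omega

lemma pvA_fold (line : String) : ∀ (ws done : List String)
    (st : Option String × Option String), (∀ w ∈ ws, w.toList ≠ []) →
    pvInvA line done st → pvInvA line (done ++ ws) (ws.foldl (pvStepA line) st) := by
  intro ws
  induction ws with
  | nil => intro done st _ h; simpa using h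
  | cons e ws ih =>
    intro done st hne h
    have h1 : pvInvA line (done ++ [e]) (pvStepA line st e) :=
      pvA_step line done st e (hne e (by simp)) h
    have := ih (done ++ [e]) (pvStepA line st e) (fun w hw => hne w (by simp [hw])) h1
    simpa [List.append_assoc] using this

lemma pvA_char (line : String) : pvIsAns line (last_word_fun line) := by
  have h0 : pvInvA line [] ((none, none) : Option String × Option String) := by
    refine ⟨rfl, by simp, by simp⟩
  have h := pvA_fold line pvWords [] (none, none) pv_words_ne_nil h0
  simp only [List.nil_append] at h
  obtain ⟨h12, hnone, hsome⟩ := h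
  unfold last_word_fun
  rw [h12]
  exact ⟨fun hh w hw => hnone hh w hw, fun m hm => hsome m hm⟩

-- ---- B side ----

def pvInvB (line : String) (i : Int) (st : PySem.Set String × Option String) : Prop :=
  (∀ w, w ∈ st.1 ↔ w ∈ pvWords ∧ 0 ≤ pvG line w ∧ pvG line w < i) ∧
  (st.2 = none → ∀ w ∈ pvWords, ¬(0 ≤ pvG line w ∧ pvG line w < i)) ∧
  (∀ m, st.2 = some m → m ∈ pvWords ∧ 0 ≤ pvG line m ∧ pvG line m < i ∧
    ∀ w ∈ pvWords, 0 ≤ pvG line w → pvG line w < i → pvG line w ≤ pvG line m)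

def pvInnerInvB (line : String) (i : Int) (done : List String)
    (st : PySem.Set String × Option String) : Prop :=
  (∀ w, w ∈ st.1 ↔ (w ∈ pvWords ∧ 0 ≤ pvG line w ∧ pvG line w < i) ∨ (w ∈ done ∧ pvG line w = i)) ∧
  (st.2 = none → (∀ w ∈ pvWords, ¬(0 ≤ pvG line w ∧ pvG line w < i)) ∧ ∀ w ∈ done, pvG line w ≠ i) ∧
  (∀ m, st.2 = some m → m ∈ pvWords ∧ 0 ≤ pvG line m ∧ pvG line m ≤ i ∧
    (∀ w ∈ pvWords, 0 ≤ pvG line w → pvG line w < i → pvG line w ≤ pvG line m) ∧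
    (∀ w ∈ done, pvG line w = i → pvG line m = i))

lemma pv_match_le (line w : String) {i : Int} (hi : 0 ≤ i)
    (h : PySem.Chars.startswith (line.toList.drop i.toNat) w.toList = true) :
    0 ≤ pvG line w ∧ pvG line w ≤ i := by
  have hp : w.toList <+: line.toList.drop i.toNat := (PySem.Chars.startswith_iff _ _).1 h
  have := pv_prefix_drop line w hp
  omega

lemma pv_eq_match (line w : String) {i : Int} (hi : 0 ≤ i) (h : pvG line w = i) :
    PySem.Chars.startswith (line.toList.drop i.toNat) w.toList = true :=
  (PySem.Chars.startswith_iff _ _).2 (pv_eq_prefix_drop line w hi h)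

lemma pvB_innerstep (line : String) (i : Int) (hi : 0 ≤ i) (done : List String)
    (st : PySem.Set String × Option String) (e : String) (he : e ∈ pvWords)
    (h : pvInnerInvB line i done st) :
    pvInnerInvB line i (done ++ [e]) (pvStepBInner line i st e) := by
  obtain ⟨hmem, hnone, hsome⟩ := h
  by_cases hc : PySem.Set.contains st.1 e = false ∧
      PySem.Chars.startswith (line.toList.drop i.toNat) e.toList = true
  · obtain ⟨hc1, hc2⟩ := hc
    have hnotmem : e ∉ st.1 := fun hh =>
      by rw [(PySem.Set.contains_iff st.1 e).2 hh] at hc1; cases hc1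
    have hrange := pv_match_le line e hi hc2
    have hge : pvG line e = i := by
      have : ¬ (e ∈ pvWords ∧ 0 ≤ pvG line e ∧ pvG line e < i) ∧
             ¬ (e ∈ done ∧ pvG line e = i) := by
        constructor <;> intro hh <;> exact hnotmem ((hmem e).2 (by tauto))
      have h1 : ¬ (0 ≤ pvG line e ∧ pvG line e < i) :=
        fun hx => this.1 ⟨he, hx.1, hx.2⟩
      omega
    have hstep : pvStepBInner line i st e = (PySem.Set.add st.1 e, some e) := by
      simp only [pvStepBInner]
      rw [if_pos ⟨hc1, hc2⟩]
    rw [hstep]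
    refine ⟨?_, by simp, ?_⟩
    · intro w
      rw [PySem.Set.mem_add, hmem w]
      constructor
      · rintro (hw | hw)
        · rcases hw with hw | hw
          · exact Or.inl hw
          · exact Or.inr ⟨List.mem_append_left _ hw.1, hw.2⟩
        · subst hw; exact Or.inr ⟨List.mem_append_right _ (by simp), hge⟩
      · rintro (hw | ⟨hw1, hw2⟩)
        · exact Or.inl (Or.inl hw)
        · rcases List.mem_append.1 hw1 with hw1 | hw1
          · exact Or.inl (Or.inr ⟨hw1, hw2⟩)
          · simp at hw1; subst hw1; exact Or.inr rfl
    · intro m hm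
      cases hm
      exact ⟨he, by omega, by omega, fun w _ _ hlt => by omega, fun _ _ _ => hge⟩
  · have hstep : pvStepBInner line i st e = st := by
      simp only [pvStepBInner]
      rw [if_neg hc]
    rw [hstep]
    have hkey : pvG line e = i → e ∈ st.1 := by
      intro hh
      have hsw := pv_eq_match line e hi hh
      by_cases hcc : PySem.Set.contains st.1 e = false
      · exact absurd ⟨hcc, hsw⟩ hc
      · have : PySem.Set.contains st.1 e = true := by
          cases hb : PySem.Set.contains st.1 e
          · exact absurd hb hcc
          · rfl
        exact (PySem.Set.contains_iff st.1 e).1 this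
    refine ⟨?_, ?_, ?_⟩
    · intro w
      rw [hmem w]
      constructor
      · rintro (hw | hw)
        · exact Or.inl hw
        · exact Or.inr ⟨List.mem_append_left _ hw.1, hw.2⟩
      · rintro (hw | ⟨hw1, hw2⟩)
        · exact Or.inl hw
        · rcases List.mem_append.1 hw1 with hw1 | hw1
          · exact Or.inr ⟨hw1, hw2⟩
          · simp at hw1; subst hw1
            exact (hmem w).1 (hkey hw2)
    · intro hh
      obtain ⟨ha, hb⟩ := hnone hh
      refine ⟨ha, ?_⟩
      intro w hw
      rcases List.mem_append.1 hw with hw | hw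
      · exact hb w hw
      · simp at hw; subst hw
        intro hgw
        rcases (hmem w).1 (hkey hgw) with hcase | hcase
        · exact ha w hcase.1 ⟨hcase.2.1, hcase.2.2⟩
        · exact hb w hcase.1 hcase.2
    · intro m hm
      obtain ⟨h1, h2, h3, h4, h5⟩ := hsome m hm
      refine ⟨h1, h2, h3, h4, ?_⟩
      intro w hw hgw
      rcases List.mem_append.1 hw with hw | hw
      · exact h5 w hw hgw
      · simp at hw; subst hw
        rcases (hmem w).1 (hkey hgw) with hcase | hcase
        · omega
        · exact h5 w hcase.1 hcase.2

lemma pvB_inner (line : String) (i : Int) (hi : 0 ≤ i) : ∀ (ws done : List String)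
    (st : PySem.Set String × Option String), (∀ w ∈ ws, w ∈ pvWords) →
    pvInnerInvB line i done st →
    pvInnerInvB line i (done ++ ws) (ws.foldl (pvStepBInner line i) st) := by
  intro ws
  induction ws with
  | nil => intro done st _ h; simpa using h
  | cons e ws ih =>
    intro done st hws h
    have h1 := pvB_innerstep line i hi done st e (hws e (by simp)) h
    have := ih (done ++ [e]) (pvStepBInner line i st e) (fun w hw => hws w (by simp [hw])) h1
    simpa [List.append_assoc] using this

lemma pvB_outer (line : String) (i : Int) (hi : 0 ≤ i)
    (st : PySem.Set String × Option String) (h : pvInvB line i st) :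
    pvInvB line (i + 1) (pvStepBOuter line st i) := by
  unfold pvStepBOuter
  obtain ⟨hmem, hnone, hsome⟩ := h
  have h0 : pvInnerInvB line i [] st := by
    refine ⟨?_, ?_, ?_⟩
    · intro w; rw [hmem w]; simp
    · intro hh; exact ⟨hnone hh, by simp⟩
    · intro m hm
      obtain ⟨h1, h2, h3, h4⟩ := hsome m hm
      exact ⟨h1, h2, by omega, h4, by simp⟩
  have h := pvB_inner line i hi pvWords [] st (fun w hw => hw) h0
  simp only [List.nil_append] at h
  obtain ⟨hmem', hnone', hsome'⟩ := h
  refine ⟨?_, ?_, ?_⟩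
  · intro w
    rw [hmem' w]
    constructor
    · rintro (⟨h1, h2, h3⟩ | ⟨h1, h2⟩)
      · exact ⟨h1, h2, by omega⟩
      · exact ⟨h1, by omega, by omega⟩
    · rintro ⟨h1, h2, h3⟩
      by_cases hh : pvG line w = i
      · exact Or.inr ⟨h1, hh⟩
      · exact Or.inl ⟨h1, h2, by omega⟩
  · intro hh w hw
    obtain ⟨ha, hb⟩ := hnone' hh
    have := ha w hw
    have := hb w hw
    omega
  · intro m hm
    obtain ⟨h1, h2, h3, h4, h5⟩ := hsome' m hm
    refine ⟨h1, h2, by omega, ?_⟩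
    intro w hw hgw hlt
    by_cases hh : pvG line w = i
    · have := h5 w hw hh; omega
    · exact h4 w hw hgw (by omega)

lemma pvB_fold (line : String) : ∀ (N : Nat),
    pvInvB line (N : Int)
      ((PySem.List.pyRange 0 (N : Int) 1).foldl (pvStepBOuter line) (PySem.Set.empty, none)) := by
  intro N
  induction N with
  | zero =>
    rw [show ((0 : Nat) : Int) = 0 from rfl, PySem.List.pyRange_one_eq_nil (by norm_num)]
    refine ⟨?_, ?_, ?_⟩
    · intro w
      constructor
      · intro hw; exact absurd hw (by simp [PySem.Set.empty])
      · intro hw; exact absurd hw.2.2 (by omega)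
    · intro _ w _; omega
    · intro m hm; cases hm
  | succ N ih =>
    have hN : (0 : Int) ≤ (N : Int) := Int.natCast_nonneg N
    have hrange : PySem.List.pyRange 0 ((N + 1 : Nat) : Int) 1
        = PySem.List.pyRange 0 (N : Int) 1 ++ [(N : Int)] := by
      rw [show ((N + 1 : Nat) : Int) = (N : Int) + 1 by push_cast; ring]
      exact PySem.List.pyRange_one_succ_right hN
    rw [hrange, show ((N + 1 : Nat) : Int) = (N : Int) + 1 by push_cast; ring,
      List.foldl_append]
    simp only [List.foldl_cons, List.foldl_nil]
    exact pvB_outer line (N : Int) hN _ ih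

lemma pv_lt_len (line w : String) (hw : w ∈ pvWords) (hg : 0 ≤ pvG line w) :
    pvG line w < (line.toList.length : Int) := by
  have hle : pvG line w ≤ (line.toList.length : Int) := by
    rw [pvG_eq]; exact PySem.Chars.find_le_length line.toList w.toList
  rcases lt_or_eq_of_le hle with h | h
  · exact h
  · exfalso
    have hp := pv_eq_prefix_drop line w (by omega) h
    rw [Int.toNat_natCast, List.drop_length] at hp
    exact pv_words_ne_nil w hw (List.prefix_nil.1 hp)

lemma pvB_char (line : String) : pvIsAns line (last_word_fun_alt line) := by
  have hlen : PySem.Str.len line = (line.toList.length : Int) := by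
    simp [PySem.Str.len_eq]
  have h := pvB_fold line line.toList.length
  rw [← hlen] at h
  obtain ⟨hmem, hnone, hsome⟩ := h
  unfold last_word_fun_alt
  refine ⟨?_, ?_⟩
  · intro hh w hw
    have ha := hnone hh w hw
    by_contra hc
    have hb := pv_lt_len line w hw (by omega)
    exact ha ⟨by omega, hb⟩
  · intro m hm
    obtain ⟨h1, h2, h3, h4⟩ := hsome m hm
    refine ⟨h1, h2, ?_⟩
    intro w hw hgw
    exact h4 w hw hgw (pv_lt_len line w hw hgw)

-- ===== VERDICT (by name: the statement is the Claim_ definition above) =====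
theorem last_word_fun_spec : Claim_equal_last_word_fun := by
  intro line _
  unfold Spec_last_word_fun
  exact pv_unique line _ _ (pvA_char line) (pvB_char line)
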